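-- pv_equiv track=rewrite | github.com/MIT-Emerging-Talent/ET6-foundations-group-31 | solutions/longest_zero_substring.py | longest_zero_substring
-- ===== SOURCE A (Python) =====
-- def longest_zero_substring(s: str) -> int:
--     """
--     Calculate the length of the longest substring of zeros ('0')
--     after eliminating pairs of consecutive ones ('1').
--
--     Parameters:
--         s (str): The binary string to process. It is expected to contain
--                 only '0' and '1'.
--
--     Returns:
--         int: The length of the longest substring of zeros ('0').
--
--     Raises:
--         ValueError: If the input string contains characters other than '0' or '1'.
--
--     Examples:
--         >>> longest_zero_substring("1100100")
--         2
--
--         >>> longest_zero_substring("0001110000")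
--         4
--
--         >>> longest_zero_substring("1")
--         0
--
--         >>> longest_zero_substring("0")
--         1
--     """
--     if not isinstance(s, str):
--         raise TypeError("Input must be a string.")
--     if any(c not in "01" for c in s):
--         raise ValueError("Input string must contain only '0' and '1'.")
--
--     stack = []
--     for c in s:
--         if c == "1" and stack and stack[-1] == "1":
--             stack.pop()
--         else:
--             stack.append(c)
--
--     cnt = 0
--     temp_cnt = 0
--     while stack:
--         if stack.pop() == "0":
--             temp_cnt += 1
--             cnt = max(cnt, temp_cnt)
--         else:
--             temp_cnt = 0
--
--     return cnt
-- ===== SOURCE B (Python) =====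
-- def longest_zero_substring(s: str) -> int:
--     if not isinstance(s, str):
--         raise TypeError("Input must be a string.")
--     if any(c not in "01" for c in s):
--         raise ValueError("Input string must contain only '0' and '1'.")
--
--     best = cur = ones = 0
--     for c in s:
--         if c == "1":
--             ones += 1
--         else:
--             if ones % 2 == 1:
--                 cur = 0
--             ones = 0
--             cur += 1
--             if cur > best:
--                 best = cur
--     return best
-- ===== Notes on version B (the rewrite author's own statement) =====
-- stated objective: simpler
-- what changed: Replaces A's two-phase stack algorithm (build a stack cancelling adjacent '1' pairs, then pop-scan it for the longest zero run) by a single O(1)-space pass that counts each '1'-run and resets the current zero counter only when that run has odd length.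
import Mathlib
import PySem

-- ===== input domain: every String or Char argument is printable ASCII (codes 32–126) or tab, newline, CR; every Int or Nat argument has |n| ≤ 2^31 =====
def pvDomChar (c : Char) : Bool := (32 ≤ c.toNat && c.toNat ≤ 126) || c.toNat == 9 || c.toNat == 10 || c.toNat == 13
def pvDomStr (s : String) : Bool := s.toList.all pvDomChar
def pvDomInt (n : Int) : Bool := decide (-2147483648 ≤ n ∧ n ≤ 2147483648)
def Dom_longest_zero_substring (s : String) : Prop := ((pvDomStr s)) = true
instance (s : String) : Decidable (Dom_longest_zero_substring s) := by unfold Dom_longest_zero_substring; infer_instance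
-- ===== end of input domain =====

-- B replaces A's stack build + pop-scan by one O(1)-space pass tracking the parity
-- of the current '1'-run (objective: simpler); return value only, no mutation involved.

-- ===== PORT A =====
-- stack step: if c == "1" and stack and stack[-1] == "1": pop else append (head = top)
def pvBuildStep (st : List Char) (c : Char) : List Char :=
  if c = '1' ∧ st.head? = some '1' then st.tail else c :: st

-- while stack: if stack.pop() == "0": temp += 1; cnt = max cnt temp else temp = 0
def pvLoopA : List Char → Int → Int → Int
  | [], cnt, _ => cnt
  | c :: rest, cnt, temp =>
    if c = '0' then pvLoopA rest (max cnt (temp + 1)) (temp + 1) else pvLoopA rest cnt 0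

def longest_zero_substring (s : String) : Int :=
  pvLoopA (s.toList.foldl pvBuildStep []) 0 0

-- ===== PORT B =====
-- state (best, cur, ones); '1' counts the run, '0' resets cur iff the run was odd
def pvStepB (st : Int × Int × Int) (c : Char) : Int × Int × Int :=
  match st with
  | (best, cur, ones) =>
    if c = '1' then (best, cur, ones + 1)
    else
      let cur := if PySem.Int.mod ones 2 = 1 then 0 else cur
      let cur := cur + 1
      (if cur > best then cur else best, cur, 0)

def longest_zero_substring_alt (s : String) : Int :=
  (s.toList.foldl pvStepB (0, 0, 0)).1

-- ===== PRECONDITION & SPEC =====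
-- Pre_ excludes exactly the strings containing a character other than '0'/'1':
-- there the Python A (and B) raise ValueError.
def Pre_longest_zero_substring (s : String) : Prop := (s.toList.all (fun c => c == '0' || c == '1')) = true
instance (s : String) : Decidable (Pre_longest_zero_substring s) := by unfold Pre_longest_zero_substring; infer_instance
def pvWitness_longest_zero_substring : String := "1100100"

def Spec_longest_zero_substring (s : String) (out : Int) : Prop := out = longest_zero_substring_alt s
instance (s : String) (out : Int) : Decidable (Spec_longest_zero_substring s out) := by unfold Spec_longest_zero_substring; infer_instance

-- ===== CLAIM (what is proved, stated in full; the proofs are below) =====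
def Claim_equal_longest_zero_substring : Prop := ∀ (s : String), Dom_longest_zero_substring s → Pre_longest_zero_substring s → Spec_longest_zero_substring s (longest_zero_substring s)

-- ===== LEMMAS AND PROOFS =====

-- leading zeros of a stack (head = top)
def pvZ : List Char → Int
  | [] => 0
  | c :: l => if c = '0' then 1 + pvZ l else 0

-- pvAux l t = best zero run found by A's scan of l when the current run already holds t
def pvAux : List Char → Int → Int
  | [], _ => 0
  | c :: l, t => if c = '0' then max (t + 1) (pvAux l (t + 1)) else pvAux l 0

lemma pvZ_cons0 (l : List Char) : pvZ ('0' :: l) = 1 + pvZ l := by simp [pvZ]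
lemma pvZ_cons1 (l : List Char) : pvZ ('1' :: l) = 0 := by simp [pvZ]
lemma pvAux_cons0 (l : List Char) (t : Int) :
    pvAux ('0' :: l) t = max (t + 1) (pvAux l (t + 1)) := by simp [pvAux]
lemma pvAux_cons1 (l : List Char) (t : Int) : pvAux ('1' :: l) t = pvAux l 0 := by simp [pvAux]

lemma pvZ_nonneg (l : List Char) : 0 ≤ pvZ l := by
  induction l with
  | nil => simp [pvZ]
  | cons c l ih => simp only [pvZ]; split <;> omega

lemma pvAux_nonneg (l : List Char) : ∀ t, 0 ≤ t → 0 ≤ pvAux l t := by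
  induction l with
  | nil => intro t ht; simp [pvAux]
  | cons c l ih =>
    intro t ht
    simp only [pvAux]; split
    · have := ih (t + 1) (by omega); omega
    · exact ih 0 le_rfl

lemma pvLoopA_eq (l : List Char) : ∀ cnt temp, 0 ≤ cnt → 0 ≤ temp →
    pvLoopA l cnt temp = max cnt (pvAux l temp) := by
  induction l with
  | nil => intro cnt temp h1 _; simp [pvLoopA, pvAux]; omega
  | cons c l ih =>
    intro cnt temp h1 h2
    simp only [pvLoopA, pvAux]
    split
    · rw [ih (max cnt (temp + 1)) (temp + 1) (by omega) (by omega)]; omega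
    · rw [ih cnt 0 h1 le_rfl]

lemma pvAux_seed (l : List Char) : ∀ t, 0 ≤ t →
    pvAux l t = if pvZ l = 0 then pvAux l 0 else max (t + pvZ l) (pvAux l 0) := by
  induction l with
  | nil => intro t _; simp [pvAux, pvZ]
  | cons c l ih =>
    intro t ht
    by_cases hc : c = '0'
    · subst hc
      have h1 := ih (t + 1) (by omega)
      have h0 := ih 1 (by omega)
      have hz := pvZ_nonneg l
      have ha := pvAux_nonneg l 0 le_rfl
      rw [pvAux_cons0, pvAux_cons0, pvZ_cons0]
      simp only [zero_add]
      rw [h1, h0]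
      by_cases hZ : pvZ l = 0
      · rw [if_pos hZ, if_pos hZ, if_neg (by omega)]; omega
      · rw [if_neg hZ, if_neg hZ, if_neg (by omega)]; omega
    · have hA : pvAux (c :: l) t = pvAux l 0 := by simp [pvAux, hc]
      have hA0 : pvAux (c :: l) 0 = pvAux l 0 := by simp [pvAux, hc]
      have hZc : pvZ (c :: l) = 0 := by simp [pvZ, hc]
      rw [hA, hA0, hZc, if_pos rfl]

lemma pvMod2 (o : Int) : PySem.Int.mod o 2 = o % 2 := by
  simp [PySem.Int.mod, Int.fmod_eq_emod]

-- reduction lemmas for the two step functions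
lemma pvStepB_one (b c o : Int) : pvStepB (b, c, o) '1' = (b, c, o + 1) := by
  simp [pvStepB]

lemma pvStepB_zero_odd (b c o : Int) (h : o % 2 = 1) :
    pvStepB (b, c, o) '0' = (max b 1, 1, 0) := by
  simp only [pvStepB, if_neg (by decide : ¬ ('0' : Char) = '1'), pvMod2, if_pos h]
  have : ((0 : Int) + 1) = 1 := by omega
  rw [this]
  rcases lt_or_ge b 1 with hb | hb
  · rw [if_pos (by omega)]; congr 1; omega
  · rw [if_neg (by omega)]; congr 1; omega

lemma pvStepB_zero_even (b c o : Int) (h : ¬ o % 2 = 1) :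
    pvStepB (b, c, o) '0' = (max b (c + 1), c + 1, 0) := by
  simp only [pvStepB, if_neg (by decide : ¬ ('0' : Char) = '1'), pvMod2, if_neg h]
  rcases lt_or_ge b (c + 1) with hb | hb
  · rw [if_pos (by omega)]; congr 1; omega
  · rw [if_neg (by omega)]; congr 1; omega

lemma pvBuildStep_push (st : List Char) (c : Char) (h : ¬ (c = '1' ∧ st.head? = some '1')) :
    pvBuildStep st c = c :: st := by simp [pvBuildStep, h]

lemma pvBuildStep_pop (st : List Char) (h : st.head? = some '1') :
    pvBuildStep st '1' = st.tail := by simp [pvBuildStep, h]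

-- invariant tying A's stack to B's state (best, cur, ones)
def pvInv (st : List Char) (b : Int × Int × Int) : Prop :=
  ∃ st0, st = (if PySem.Int.mod b.2.2 2 = 1 then ['1'] else []) ++ st0 ∧
    st0.head? ≠ some '1' ∧ 0 ≤ b.2.2 ∧ b.2.1 = pvZ st0 ∧ b.1 = pvAux st0 0

lemma pvInv_step (st : List Char) (b : Int × Int × Int) (c : Char)
    (hc : c = '0' ∨ c = '1') (h : pvInv st b) :
    pvInv (pvBuildStep st c) (pvStepB b c) := by
  obtain ⟨best, cur, ones⟩ := b
  obtain ⟨st0, hst, hhd, ho, hcur, hbest⟩ := h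
  simp only at hst hhd ho hcur hbest
  rw [pvMod2] at hst
  have ha := pvAux_nonneg st0 0 le_rfl
  have hz := pvZ_nonneg st0
  rcases hc with hc | hc
  · subst hc
    by_cases hpar : ones % 2 = 1
    · -- odd '1'-run on the stack; push '0'; B resets cur
      rw [if_pos hpar] at hst
      refine ⟨'0' :: '1' :: st0, ?_, by simp, ?_, ?_, ?_⟩
      · rw [hst, pvBuildStep_push _ _ (by simp), pvStepB_zero_odd _ _ _ hpar]
        simp
      · rw [pvStepB_zero_odd _ _ _ hpar]
      · rw [pvStepB_zero_odd _ _ _ hpar, pvZ_cons0, pvZ_cons1]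
        dsimp only; omega
      · rw [pvStepB_zero_odd _ _ _ hpar, pvAux_cons0, pvAux_cons1, hbest]
        dsimp only; simp only [zero_add]; omega
    · -- fully cancelled '1'-run; push '0' onto st0
      rw [if_neg hpar] at hst
      have hpush : pvBuildStep st '0' = '0' :: st0 := by
        rw [hst]; exact pvBuildStep_push _ _ (by simp)
      have hseed := pvAux_seed st0 1 (by omega)
      refine ⟨'0' :: st0, ?_, by simp, ?_, ?_, ?_⟩
      · rw [hpush, pvStepB_zero_even _ _ _ hpar]; simp
      · rw [pvStepB_zero_even _ _ _ hpar]
      · rw [pvStepB_zero_even _ _ _ hpar, pvZ_cons0]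
        dsimp only; omega
      · rw [pvStepB_zero_even _ _ _ hpar, pvAux_cons0]
        dsimp only; simp only [zero_add]
        rw [hseed, hbest, hcur]
        by_cases hZ : pvZ st0 = 0
        · rw [if_pos hZ]; omega
        · rw [if_neg hZ]; omega
  · subst hc
    by_cases hpar : ones % 2 = 1
    · -- top is '1': pop; the run becomes even
      rw [if_pos hpar] at hst
      refine ⟨st0, ?_, hhd, ?_, ?_, ?_⟩
      · rw [hst, pvBuildStep_pop _ (by simp), pvStepB_one]
        simp only [List.singleton_append, List.tail_cons, pvMod2]
        rw [if_neg (by omega)]; simp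
      · rw [pvStepB_one]; dsimp only; omega
      · rw [pvStepB_one]; exact hcur
      · rw [pvStepB_one]; exact hbest
    · -- top is not '1': push; the run becomes odd
      rw [if_neg hpar] at hst
      refine ⟨st0, ?_, hhd, ?_, ?_, ?_⟩
      · rw [hst, pvBuildStep_push _ _ (by simpa using fun h => hhd h), pvStepB_one]
        simp only [pvMod2]
        rw [if_pos (by omega)]
        simp
      · rw [pvStepB_one]; dsimp only; omega
      · rw [pvStepB_one]; exact hcur
      · rw [pvStepB_one]; exact hbest

lemma pvInv_fold (l : List Char) : ∀ st b, (∀ c ∈ l, c = '0' ∨ c = '1') → pvInv st b →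
    pvInv (l.foldl pvBuildStep st) (l.foldl pvStepB b) := by
  induction l with
  | nil => intro st b _ h; simpa using h
  | cons c l ih =>
    intro st b hall h
    simp only [List.foldl_cons]
    exact ih _ _ (fun x hx => hall x (List.mem_cons_of_mem _ hx))
      (pvInv_step st b c (hall c List.mem_cons_self) h)

-- ===== VERDICT (by name: the statement is the Claim_ definition above) =====
theorem longest_zero_substring_spec : Claim_equal_longest_zero_substring := by
  intro s _ hpre0
  have hpre : ∀ c ∈ s.toList, c = '0' ∨ c = '1' := by
    intro c hc
    have := List.all_eq_true.mp hpre0 c hc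
    simpa using this
  unfold Spec_longest_zero_substring longest_zero_substring longest_zero_substring_alt
  have h0 : pvInv [] ((0 : Int), (0 : Int), (0 : Int)) :=
    ⟨[], by simp, by simp, le_rfl, rfl, rfl⟩
  have h := pvInv_fold s.toList [] (0, 0, 0) hpre h0
  obtain ⟨st0, hst, _, ho, _, hbest⟩ := h
  rw [pvLoopA_eq _ 0 0 le_rfl le_rfl, hst]
  have ha := pvAux_nonneg st0 0 le_rfl
  split
  · rw [List.singleton_append, pvAux_cons1, ← hbest]; omega
  · rw [List.nil_append, ← hbest]; omega
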